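-- pv_equiv track=rewrite | github.com/Aniket-Dev-IT/GupShup | admin_panel/management/commands/create_admin.py | _get_role_permissions_dict
-- ===== SOURCE A (Python) =====
-- def _get_role_permissions_dict(role):
--     """Get permissions dictionary for a role"""
--     base_permissions = {
--         'can_view_dashboard': True,
--         'can_view_users': False,
--         'can_edit_users': False,
--         'can_ban_users': False,
--         'can_delete_users': False,
--         'can_view_posts': False,
--         'can_edit_posts': False,
--         'can_delete_posts': False,
--         'can_moderate_content': False,
--         'can_manage_warnings': False,
--         'can_view_analytics': False,
--         'can_view_audit_logs': False,
--         'can_manage_admins': False,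
--         'can_create_announcements': False,
--         'can_manage_settings': False
--     }
--
--     if role == 'super_admin':
--         # Super admin has all permissions
--         return {key: True for key in base_permissions}
--
--     elif role == 'admin':
--         base_permissions.update({
--             'can_view_users': True,
--             'can_edit_users': True,
--             'can_ban_users': True,
--             'can_view_posts': True,
--             'can_edit_posts': True,
--             'can_delete_posts': True,
--             'can_moderate_content': True,
--             'can_manage_warnings': True,
--             'can_view_analytics': True,
--             'can_view_audit_logs': True,
--             'can_create_announcements': True
--         })
--
--     elif role == 'moderator':
--         base_permissions.update({
--             'can_view_users': True,
--             'can_view_posts': True,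
--             'can_edit_posts': True,
--             'can_moderate_content': True,
--             'can_manage_warnings': True,
--             'can_view_analytics': True
--         })
--
--     elif role == 'support':
--         base_permissions.update({
--             'can_view_users': True,
--             'can_view_posts': True,
--             'can_view_analytics': True
--         })
--
--     return base_permissions
-- ===== SOURCE B (Python) =====
-- ALL_PERMS = [
--     'can_view_dashboard', 'can_view_users', 'can_edit_users', 'can_ban_users',
--     'can_delete_users', 'can_view_posts', 'can_edit_posts', 'can_delete_posts',
--     'can_moderate_content', 'can_manage_warnings', 'can_view_analytics',
--     'can_view_audit_logs', 'can_manage_admins', 'can_create_announcements',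
--     'can_manage_settings',
-- ]
--
-- ROLE_GRANTS = {
--     'super_admin': set(ALL_PERMS),
--     'admin': {
--         'can_view_dashboard', 'can_view_users', 'can_edit_users', 'can_ban_users',
--         'can_view_posts', 'can_edit_posts', 'can_delete_posts',
--         'can_moderate_content', 'can_manage_warnings', 'can_view_analytics',
--         'can_view_audit_logs', 'can_create_announcements',
--     },
--     'moderator': {
--         'can_view_dashboard', 'can_view_users', 'can_view_posts', 'can_edit_posts',
--         'can_moderate_content', 'can_manage_warnings', 'can_view_analytics',
--     },
--     'support': {
--         'can_view_dashboard', 'can_view_users', 'can_view_posts', 'can_view_analytics',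
--     },
-- }
--
--
-- def _get_role_permissions_dict(role):
--     """Get permissions dictionary for a role"""
--     granted = ROLE_GRANTS.get(role, {'can_view_dashboard'})
--     return {k: k in granted for k in ALL_PERMS}
-- ===== Notes on version B (the rewrite author's own statement) =====
-- stated objective: idiomatic
-- what changed: Replaces the mutable base-dict-plus-update branching with a fixed key list and a role->granted-set table, building the result in one comprehension over all keys.
import Mathlib
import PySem

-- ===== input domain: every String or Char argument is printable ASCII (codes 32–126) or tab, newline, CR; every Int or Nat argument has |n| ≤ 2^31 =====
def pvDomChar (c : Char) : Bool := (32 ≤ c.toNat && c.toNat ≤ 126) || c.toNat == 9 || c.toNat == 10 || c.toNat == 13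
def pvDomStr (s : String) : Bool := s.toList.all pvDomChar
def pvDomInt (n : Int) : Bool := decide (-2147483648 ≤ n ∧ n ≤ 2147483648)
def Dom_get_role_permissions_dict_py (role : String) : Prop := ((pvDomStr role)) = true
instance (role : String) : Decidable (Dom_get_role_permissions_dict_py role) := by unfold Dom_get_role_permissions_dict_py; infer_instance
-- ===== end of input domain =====

-- B replaces A's base-dict-plus-update branching with a fixed key list and a role->granted-set
-- table read by one comprehension over all keys (idiomatic; return value only, no speed claim).

-- ===== PORT A =====
def get_role_permissions_dict_py (role : String) : List (String × Bool) :=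
  let base : PySem.Dict String Bool :=
    PySem.Dict.ofList
    [("can_view_dashboard", true), ("can_view_users", false), ("can_edit_users", false),
     ("can_ban_users", false), ("can_delete_users", false), ("can_view_posts", false),
     ("can_edit_posts", false), ("can_delete_posts", false), ("can_moderate_content", false),
     ("can_manage_warnings", false), ("can_view_analytics", false), ("can_view_audit_logs", false),
     ("can_manage_admins", false), ("can_create_announcements", false), ("can_manage_settings", false)]
  (if role = "super_admin" then
    -- {key: True for key in base_permissions}
    (PySem.Dict.keys base).foldl (fun d k => PySem.Dict.insert d k true) PySem.Dict.empty
  else if role = "admin" then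
    ([("can_view_users", true), ("can_edit_users", true), ("can_ban_users", true),
      ("can_view_posts", true), ("can_edit_posts", true), ("can_delete_posts", true),
      ("can_moderate_content", true), ("can_manage_warnings", true), ("can_view_analytics", true),
      ("can_view_audit_logs", true), ("can_create_announcements", true)] : List (String × Bool)).foldl
      (fun d kv => PySem.Dict.insert d kv.1 kv.2) base
  else if role = "moderator" then
    ([("can_view_users", true), ("can_view_posts", true), ("can_edit_posts", true),
      ("can_moderate_content", true), ("can_manage_warnings", true), ("can_view_analytics", true)] :
      List (String × Bool)).foldl (fun d kv => PySem.Dict.insert d kv.1 kv.2) base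
  else if role = "support" then
    ([("can_view_users", true), ("can_view_posts", true), ("can_view_analytics", true)] :
      List (String × Bool)).foldl (fun d kv => PySem.Dict.insert d kv.1 kv.2) base
  else
    base).items

-- ===== PORT B =====
def pvAllPerms : List String :=
  ["can_view_dashboard", "can_view_users", "can_edit_users", "can_ban_users",
   "can_delete_users", "can_view_posts", "can_edit_posts", "can_delete_posts",
   "can_moderate_content", "can_manage_warnings", "can_view_analytics",
   "can_view_audit_logs", "can_manage_admins", "can_create_announcements",
   "can_manage_settings"]

def pvRoleGrants : PySem.Dict String (PySem.Set String) :=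
  PySem.Dict.ofList
  [("super_admin", PySem.Set.ofList pvAllPerms),
   ("admin", PySem.Set.ofList
     ["can_view_dashboard", "can_view_users", "can_edit_users", "can_ban_users",
      "can_view_posts", "can_edit_posts", "can_delete_posts", "can_moderate_content",
      "can_manage_warnings", "can_view_analytics", "can_view_audit_logs",
      "can_create_announcements"]),
   ("moderator", PySem.Set.ofList
     ["can_view_dashboard", "can_view_users", "can_view_posts", "can_edit_posts",
      "can_moderate_content", "can_manage_warnings", "can_view_analytics"]),
   ("support", PySem.Set.ofList
     ["can_view_dashboard", "can_view_users", "can_view_posts", "can_view_analytics"])]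

def get_role_permissions_dict_py_alt (role : String) : List (String × Bool) :=
  let granted := PySem.Dict.getD pvRoleGrants role (PySem.Set.ofList ["can_view_dashboard"])
  pvAllPerms.map (fun k => (k, granted.contains k))

-- ===== PRECONDITION & SPEC =====
def Spec_get_role_permissions_dict_py (role : String) (out : List (String × Bool)) : Prop := out = get_role_permissions_dict_py_alt role
instance (role : String) (out : List (String × Bool)) : Decidable (Spec_get_role_permissions_dict_py role out) := by unfold Spec_get_role_permissions_dict_py; infer_instance

-- ===== CLAIM (what is proved, stated in full; the proofs are below) =====
def Claim_equal_get_role_permissions_dict_py : Prop := ∀ (role : String), Dom_get_role_permissions_dict_py role → Spec_get_role_permissions_dict_py role (get_role_permissions_dict_py role)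

-- ===== LEMMAS AND PROOFS =====

-- ===== VERDICT (by name: the statement is the Claim_ definition above) =====
theorem get_role_permissions_dict_py_spec : Claim_equal_get_role_permissions_dict_py := by
  intro role _
  unfold Spec_get_role_permissions_dict_py
  by_cases h1 : role = "super_admin"
  · subst h1; decide
  by_cases h2 : role = "admin"
  · subst h2; decide
  by_cases h3 : role = "moderator"
  · subst h3; decide
  by_cases h4 : role = "support"
  · subst h4; decide
  simp only [get_role_permissions_dict_py, get_role_permissions_dict_py_alt,
    if_neg h1, if_neg h2, if_neg h3, if_neg h4]
  have g1 : ("super_admin" == role) = false := by simp [Ne.symm h1]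
  have g2 : ("admin" == role) = false := by simp [Ne.symm h2]
  have g3 : ("moderator" == role) = false := by simp [Ne.symm h3]
  have g4 : ("support" == role) = false := by simp [Ne.symm h4]
  have hd : PySem.Dict.getD pvRoleGrants role (PySem.Set.ofList ["can_view_dashboard"])
      = PySem.Set.ofList ["can_view_dashboard"] := by
    simp [pvRoleGrants, PySem.Dict.ofList, PySem.Dict.update, PySem.Dict.empty,
      PySem.Dict.insert, PySem.Dict.contains, PySem.Dict.getD, PySem.Dict.get?,
      List.find?, g1, g2, g3, g4]
  rw [hd]
  decide
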